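-- pv_equiv track=rewrite | github.com/shhuan1989/algorithms | codeforces/1365E.py | solve
-- ===== SOURCE A (Python) =====
-- def solve(N, A):
--     if N == 1:
--         return A[0]
--     elif N == 2:
--         return A[0] | A[1]
--
--     ans = 0
--     for i in range(N):
--         for j in range(i+1, N):
--             for k in range(j+1, N):
--                 ans = max(ans, A[i] | A[j] | A[k])
--
--     return ans
-- ===== SOURCE B (Python) =====
-- def solve(N, A):
--     if N == 1:
--         return A[0]
--     if N == 2:
--         return A[0] | A[1]
--     ans = 0
--     pairs = set()
--     prefix = []
--     for k in range(N):
--         x = A[k]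
--         for p in pairs:
--             v = p | x
--             if v > ans:
--                 ans = v
--         for y in prefix:
--             pairs.add(y | x)
--         prefix.append(x)
--     return ans
-- ===== Notes on version B (the rewrite author's own statement) =====
-- stated objective: alternative
-- what changed: Replaces the triple nested index loop with a single left-to-right pass that maintains a deduplicated set of all pairwise ORs of the prefix and combines each new element with that set, so duplicate pair-OR values collapse instead of being re-enumerated.
import Mathlib
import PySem

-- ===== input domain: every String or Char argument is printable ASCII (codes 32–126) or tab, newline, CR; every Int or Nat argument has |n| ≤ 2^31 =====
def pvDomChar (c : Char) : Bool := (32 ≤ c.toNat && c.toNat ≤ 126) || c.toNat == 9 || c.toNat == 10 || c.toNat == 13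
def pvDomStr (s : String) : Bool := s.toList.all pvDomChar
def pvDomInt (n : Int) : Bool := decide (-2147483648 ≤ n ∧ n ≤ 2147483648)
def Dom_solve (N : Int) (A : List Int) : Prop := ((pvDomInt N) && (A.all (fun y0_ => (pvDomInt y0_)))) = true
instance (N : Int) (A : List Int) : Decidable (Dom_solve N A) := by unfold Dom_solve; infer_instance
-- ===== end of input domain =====

-- B replaces A's triple nested index loop by a single pass that keeps a set of pairwise ORs of the
-- prefix and combines each new element against it (alternative decomposition, same worst-case cost).

-- ===== PORT A =====
def solve (N : Int) (A : List Int) : Int :=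
  if N == 1 then PySem.List.pyGetD A 0 0
  else if N == 2 then PySem.Int.bor (PySem.List.pyGetD A 0 0) (PySem.List.pyGetD A 1 0)
  else
    (PySem.List.pyRange 0 N 1).foldl (fun ans i =>
      (PySem.List.pyRange (i+1) N 1).foldl (fun ans j =>
        (PySem.List.pyRange (j+1) N 1).foldl (fun ans k =>
          max ans (PySem.Int.bor (PySem.Int.bor (PySem.List.pyGetD A i 0) (PySem.List.pyGetD A j 0)) (PySem.List.pyGetD A k 0))) ans) ans) 0

-- ===== PORT B =====
-- the body of Source B's "for k in range(N)" loop; state = (ans, pairs, prefix)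
def solveStep (A : List Int) (st : Int × PySem.Set Int × List Int) (k : Int) :
    Int × PySem.Set Int × List Int :=
  let x := PySem.List.pyGetD A k 0
  let ans := st.2.1.foldl (fun a p =>
    let v := PySem.Int.bor p x
    if v > a then v else a) st.1
  let pairs := st.2.2.foldl (fun s y => PySem.Set.add s (PySem.Int.bor y x)) st.2.1
  (ans, pairs, st.2.2 ++ [x])

def solve_alt (N : Int) (A : List Int) : Int :=
  if N == 1 then PySem.List.pyGetD A 0 0
  else if N == 2 then PySem.Int.bor (PySem.List.pyGetD A 0 0) (PySem.List.pyGetD A 1 0)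
  else
    ((PySem.List.pyRange 0 N 1).foldl (solveStep A) (0, PySem.Set.empty, [])).1

-- ===== PRECONDITION & SPEC =====
-- Pre_ excludes exactly the inputs on which Python A raises IndexError: N exceeding len(A).
def Pre_solve (N : Int) (A : List Int) : Prop := N ≤ (A.length : Int)
instance (N : Int) (A : List Int) : Decidable (Pre_solve N A) := by unfold Pre_solve; infer_instance
def pvWitness_solve : Int × List Int := (3, [1, 2, 4])

def Spec_solve (N : Int) (A : List Int) (out : Int) : Prop := out = solve_alt N A
instance (N : Int) (A : List Int) (out : Int) : Decidable (Spec_solve N A out) := by unfold Spec_solve; infer_instance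

-- ===== CLAIM (what is proved, stated in full; the proofs are below) =====
def Claim_equal_solve : Prop := ∀ (N : Int) (A : List Int), Dom_solve N A → Pre_solve N A → Spec_solve N A (solve N A)

-- ===== LEMMAS AND PROOFS =====

-- r is the maximum of the baseline c and all values satisfying S
def MaxOf (c : Int) (S : Int → Prop) (r : Int) : Prop :=
  c ≤ r ∧ (∀ v, S v → v ≤ r) ∧ (r = c ∨ S r)

theorem maxOf_unique {c : Int} {S : Int → Prop} {r₁ r₂ : Int}
    (h₁ : MaxOf c S r₁) (h₂ : MaxOf c S r₂) : r₁ = r₂ := by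
  obtain ⟨hc₁, hub₁, hm₁⟩ := h₁
  obtain ⟨hc₂, hub₂, hm₂⟩ := h₂
  apply le_antisymm
  · rcases hm₁ with h | h
    · exact h ▸ hc₂
    · exact hub₂ _ h
  · rcases hm₂ with h | h
    · exact h ▸ hc₁
    · exact hub₁ _ h

theorem maxOf_congr {c : Int} {S S' : Int → Prop} {r : Int}
    (h : MaxOf c S r) (hss : ∀ v, S v ↔ S' v) : MaxOf c S' r :=
  ⟨h.1, fun v hv => h.2.1 v ((hss v).2 hv), h.2.2.imp id ((hss _).1)⟩

-- a fold behaves like a running maximum over the values P associates to the elements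
def FoldSpec {α : Type} (P : α → Int → Prop) (F : Int → α → Int) (l : List α) : Prop :=
  ∀ c : Int, c ≤ l.foldl F c ∧ (∀ x ∈ l, ∀ v, P x v → v ≤ l.foldl F c) ∧
    (l.foldl F c = c ∨ ∃ x ∈ l, P x (l.foldl F c))

theorem foldl_max_spec {α : Type} (P : α → Int → Prop) (F : Int → α → Int)
    (hmono : ∀ a x, a ≤ F a x)
    (hub : ∀ a x v, P x v → v ≤ F a x)
    (hcases : ∀ a x, F a x = a ∨ P x (F a x)) :
    ∀ (l : List α), FoldSpec P F l := by
  intro l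
  induction l with
  | nil => intro c; exact ⟨le_refl _, by simp, Or.inl rfl⟩
  | cons x l ih =>
    intro c
    obtain ⟨h1, h2, h3⟩ := ih (F c x)
    refine ⟨le_trans (hmono c x) h1, ?_, ?_⟩
    · intro y hy v hv
      rcases List.mem_cons.mp hy with rfl | hy
      · exact le_trans (hub c y v hv) h1
      · exact h2 y hy v hv
    · rcases h3 with h | ⟨y, hy, hP⟩
      · rcases hcases c x with hc | hP
        · exact Or.inl (by simpa [List.foldl_cons, h] using hc)
        · exact Or.inr ⟨x, List.mem_cons_self .., by simpa [List.foldl_cons, h] using hP⟩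
      · exact Or.inr ⟨y, List.mem_cons_of_mem _ hy, hP⟩

theorem foldSpec_max {α : Type} (f : α → Int) (l : List α) :
    FoldSpec (fun x v => v = f x) (fun a x => max a (f x)) l :=
  foldl_max_spec _ _ (fun a x => le_max_left _ _)
    (fun a x v hv => hv ▸ le_max_right _ _)
    (fun a x => max_choice _ _) l

theorem foldSpec_ifmax {α : Type} (f : α → Int) (l : List α) :
    FoldSpec (fun x v => v = f x) (fun a x => if f x > a then f x else a) l :=
  foldl_max_spec _ _
    (fun a x => by by_cases h : f x > a <;> simp [h] <;> omega)
    (fun a x v hv => by subst hv; by_cases h : f x > a <;> simp [h] <;> omega)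
    (fun a x => by by_cases h : f x > a
                   · exact Or.inr (by simp [h])
                   · exact Or.inl (by simp [h])) l

theorem foldSpec_nest {α β : Type} (P : α → β → Int → Prop) (F : α → Int → β → Int)
    (L : α → List β) (h : ∀ x, FoldSpec (P x) (F x) (L x)) (l : List α) :
    FoldSpec (fun x v => ∃ y ∈ L x, P x y v) (fun a x => (L x).foldl (F x) a) l :=
  foldl_max_spec _ _ (fun a x => (h x a).1)
    (fun a x v hv => by obtain ⟨y, hy, hp⟩ := hv; exact (h x a).2.1 y hy v hp)
    (fun a x => (h x a).2.2) l

-- the OR-values of index triples i < j < k below N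
def TS (N : Int) (A : List Int) (v : Int) : Prop :=
  ∃ i j k : Int, 0 ≤ i ∧ i < j ∧ j < k ∧ k < N ∧
    v = PySem.Int.bor (PySem.Int.bor (PySem.List.pyGetD A i 0) (PySem.List.pyGetD A j 0)) (PySem.List.pyGetD A k 0)

theorem TS_toNat (N : Int) (A : List Int) (v : Int) :
    TS ((N.toNat : Nat) : Int) A v ↔ TS N A v := by
  constructor <;> rintro ⟨i, j, k, h1, h2, h3, h4, rfl⟩ <;>
    exact ⟨i, j, k, h1, h2, h3, by omega, rfl⟩

theorem solveStep_def (A : List Int) (st : Int × PySem.Set Int × List Int) (k : Int) :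
    solveStep A st k =
      (st.2.1.foldl (fun a p =>
          if PySem.Int.bor p (PySem.List.pyGetD A k 0) > a
          then PySem.Int.bor p (PySem.List.pyGetD A k 0) else a) st.1,
       st.2.2.foldl (fun s y => PySem.Set.add s (PySem.Int.bor y (PySem.List.pyGetD A k 0))) st.2.1,
       st.2.2 ++ [PySem.List.pyGetD A k 0]) := rfl

theorem mem_foldl_setAdd (x : Int) :
    ∀ (l : List Int) (s : PySem.Set Int) (v : Int),
      v ∈ l.foldl (fun s y => PySem.Set.add s (PySem.Int.bor y x)) s ↔
        v ∈ s ∨ ∃ y ∈ l, v = PySem.Int.bor y x := by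
  intro l
  induction l with
  | nil => simp
  | cons y l ih =>
    intro s v
    rw [List.foldl_cons, ih]
    simp only [PySem.Set.mem_add, List.mem_cons]
    constructor
    · rintro ((hs | rfl) | ⟨y', hy', rfl⟩)
      · exact Or.inl hs
      · exact Or.inr ⟨y, Or.inl rfl, rfl⟩
      · exact Or.inr ⟨y', Or.inr hy', rfl⟩
    · rintro (hs | ⟨y', (rfl | hy'), rfl⟩)
      · exact Or.inl (Or.inl hs)
      · exact Or.inl (Or.inr rfl)
      · exact Or.inr ⟨y', hy', rfl⟩

-- the state of Source B's loop after the iterations k = 0 … M-1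
def altSt (A : List Int) (M : Int) : Int × PySem.Set Int × List Int :=
  (PySem.List.pyRange 0 M 1).foldl (solveStep A) (0, PySem.Set.empty, [])

theorem altInv (A : List Int) : ∀ n : Nat,
    (altSt A (n : Int)).2.2 = (PySem.List.pyRange 0 (n : Int) 1).map (fun i => PySem.List.pyGetD A i 0) ∧
    (∀ v, v ∈ (altSt A (n : Int)).2.1 ↔ ∃ i j : Int, 0 ≤ i ∧ i < j ∧ j < (n : Int) ∧
        v = PySem.Int.bor (PySem.List.pyGetD A i 0) (PySem.List.pyGetD A j 0)) ∧
    MaxOf 0 (TS (n : Int) A) (altSt A (n : Int)).1 := by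
  intro n
  induction n with
  | zero =>
    refine ⟨by simp [altSt, PySem.List.pyRange_one_eq_nil], ?_, ?_⟩
    · intro v
      simp only [altSt, PySem.List.pyRange_one_eq_nil (by omega : (0:Int) ≤ 0), List.foldl_nil]
      constructor
      · intro h; exact absurd h (by simp [PySem.Set.empty])
      · rintro ⟨i, j, h1, h2, h3, rfl⟩; omega
    · refine ⟨le_refl _, ?_, Or.inl rfl⟩
      rintro v ⟨i, j, k, h1, h2, h3, h4, rfl⟩; omega
  | succ n ih =>
    obtain ⟨hpre, hpair, hmax⟩ := ih
    have hcast : ((n + 1 : Nat) : Int) = (n : Int) + 1 := by push_cast; ring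
    have hsplit : altSt A ((n + 1 : Nat) : Int) = solveStep A (altSt A (n : Int)) (n : Int) := by
      unfold altSt
      rw [hcast, PySem.List.pyRange_one_succ_right (Int.natCast_nonneg n), List.foldl_append,
        List.foldl_cons, List.foldl_nil]
    rw [hsplit, solveStep_def]
    refine ⟨?_, ?_, ?_⟩
    · -- prefix component
      dsimp only
      rw [hpre, hcast, PySem.List.pyRange_one_succ_right (Int.natCast_nonneg n), List.map_append]
      rfl
    · -- pairs component
      intro v
      dsimp only
      rw [mem_foldl_setAdd, hpair v, hpre]
      constructor
      · rintro (⟨i, j, h1, h2, h3, rfl⟩ | ⟨y, hy, rfl⟩)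
        · exact ⟨i, j, h1, h2, by omega, rfl⟩
        · obtain ⟨i, hi, rfl⟩ := List.mem_map.mp hy
          obtain ⟨hi1, hi2⟩ := (PySem.List.mem_pyRange_one).mp hi
          exact ⟨i, (n : Int), hi1, hi2, by omega, rfl⟩
      · rintro ⟨i, j, h1, h2, h3, rfl⟩
        by_cases hj : j < (n : Int)
        · exact Or.inl ⟨i, j, h1, h2, hj, rfl⟩
        · have hjn : j = (n : Int) := by omega
          subst hjn
          refine Or.inr ⟨PySem.List.pyGetD A i 0,
            List.mem_map.mpr ⟨i, (PySem.List.mem_pyRange_one).mpr ⟨h1, by omega⟩, rfl⟩, rfl⟩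
    · -- max component
      dsimp only
      obtain ⟨hc, hub, hm⟩ :=
        foldSpec_ifmax (fun p => PySem.Int.bor p (PySem.List.pyGetD A (n : Int) 0))
          (altSt A (n : Int)).2.1 (altSt A (n : Int)).1
      refine ⟨le_trans hmax.1 hc, ?_, ?_⟩
      · rintro v ⟨i, j, k, h1, h2, h3, h4, rfl⟩
        by_cases hk : k < (n : Int)
        · exact le_trans (hmax.2.1 _ ⟨i, j, k, h1, h2, h3, hk, rfl⟩) hc
        · have hkn : k = (n : Int) := by omega
          subst hkn
          exact hub _ ((hpair _).mpr ⟨i, j, h1, h2, h3, rfl⟩) _ rfl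
      · rcases hm with he | ⟨p, hp, he⟩
        · rw [he]
          rcases hmax.2.2 with h0 | ⟨i, j, k, h1, h2, h3, h4, h5⟩
          · exact Or.inl h0
          · exact Or.inr ⟨i, j, k, h1, h2, h3, by omega, h5⟩
        · rw [he]
          obtain ⟨i, j, h1, h2, h3, rfl⟩ := (hpair p).mp hp
          exact Or.inr ⟨i, j, (n : Int), h1, h2, h3, by omega, rfl⟩

theorem solveA_maxOf (N : Int) (A : List Int) (h1 : ¬ N = 1) (h2 : ¬ N = 2) :
    MaxOf 0 (TS N A) (solve N A) := by
  unfold solve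
  rw [if_neg (by simp [h1]), if_neg (by simp [h2])]
  have hinner : ∀ i j : Int,
      FoldSpec (fun k v => v = PySem.Int.bor (PySem.Int.bor (PySem.List.pyGetD A i 0) (PySem.List.pyGetD A j 0)) (PySem.List.pyGetD A k 0))
        (fun ans k => max ans (PySem.Int.bor (PySem.Int.bor (PySem.List.pyGetD A i 0) (PySem.List.pyGetD A j 0)) (PySem.List.pyGetD A k 0)))
        (PySem.List.pyRange (j+1) N 1) :=
    fun i j => foldSpec_max _ _
  have hmid : ∀ i : Int,
      FoldSpec (fun j v => ∃ k ∈ PySem.List.pyRange (j+1) N 1,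
          v = PySem.Int.bor (PySem.Int.bor (PySem.List.pyGetD A i 0) (PySem.List.pyGetD A j 0)) (PySem.List.pyGetD A k 0))
        (fun ans j => (PySem.List.pyRange (j+1) N 1).foldl (fun ans k =>
          max ans (PySem.Int.bor (PySem.Int.bor (PySem.List.pyGetD A i 0) (PySem.List.pyGetD A j 0)) (PySem.List.pyGetD A k 0))) ans)
        (PySem.List.pyRange (i+1) N 1) :=
    fun i => foldSpec_nest _ _ _ (hinner i) _
  have houter :
      FoldSpec (fun i v => ∃ j ∈ PySem.List.pyRange (i+1) N 1, ∃ k ∈ PySem.List.pyRange (j+1) N 1,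
          v = PySem.Int.bor (PySem.Int.bor (PySem.List.pyGetD A i 0) (PySem.List.pyGetD A j 0)) (PySem.List.pyGetD A k 0))
        (fun ans i => (PySem.List.pyRange (i+1) N 1).foldl (fun ans j =>
          (PySem.List.pyRange (j+1) N 1).foldl (fun ans k =>
            max ans (PySem.Int.bor (PySem.Int.bor (PySem.List.pyGetD A i 0) (PySem.List.pyGetD A j 0)) (PySem.List.pyGetD A k 0))) ans) ans)
        (PySem.List.pyRange 0 N 1) :=
    foldSpec_nest _ _ _ hmid _
  obtain ⟨hc, hub, hm⟩ := houter 0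
  refine ⟨hc, ?_, ?_⟩
  · rintro v ⟨i, j, k, hi, hij, hjk, hkN, rfl⟩
    exact hub i ((PySem.List.mem_pyRange_one).mpr ⟨hi, by omega⟩) _
      ⟨j, (PySem.List.mem_pyRange_one).mpr ⟨by omega, by omega⟩,
       k, (PySem.List.mem_pyRange_one).mpr ⟨by omega, by omega⟩, rfl⟩
  · rcases hm with he | ⟨i, hi, j, hj, k, hk, he⟩
    · exact Or.inl he
    · obtain ⟨hi1, hi2⟩ := (PySem.List.mem_pyRange_one).mp hi
      obtain ⟨hj1, hj2⟩ := (PySem.List.mem_pyRange_one).mp hj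
      obtain ⟨hk1, hk2⟩ := (PySem.List.mem_pyRange_one).mp hk
      exact Or.inr ⟨i, j, k, hi1, by omega, by omega, hk2, he⟩

theorem solveB_maxOf (N : Int) (A : List Int) (h1 : ¬ N = 1) (h2 : ¬ N = 2) :
    MaxOf 0 (TS N A) (solve_alt N A) := by
  have halt : solve_alt N A = (altSt A N).1 := by
    unfold solve_alt altSt
    rw [if_neg (by simp [h1]), if_neg (by simp [h2])]
  rw [halt]
  have h3 : altSt A N = altSt A ((N.toNat : Nat) : Int) := by
    by_cases hN : 0 ≤ N
    · rw [Int.toNat_of_nonneg hN]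
    · unfold altSt
      rw [PySem.List.pyRange_one_eq_nil (by omega), PySem.List.pyRange_one_eq_nil (by omega)]
  rw [h3]
  exact maxOf_congr ((altInv A N.toNat).2.2) (fun v => TS_toNat N A v)

theorem solve_eq_alt (N : Int) (A : List Int) : solve N A = solve_alt N A := by
  by_cases h1 : N = 1
  · subst h1; rfl
  · by_cases h2 : N = 2
    · subst h2; rfl
    · exact maxOf_unique (solveA_maxOf N A h1 h2) (solveB_maxOf N A h1 h2)

-- ===== VERDICT (by name: the statement is the Claim_ definition above) =====
theorem solve_spec : Claim_equal_solve := by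
  intro N A _ _
  exact solve_eq_alt N A
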